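-- pv_equiv track=rewrite | github.com/mlefebvre1/projecteuler-python | project_euler/problems/problem65.py | convergent_of_e_fraction
-- ===== SOURCE A (Python) =====
-- def convergent_of_e_fraction(m):
--     """
--     the sequence of convergent can be computed as :
--     e = h(n)/k(n)
--     h(n) = a(n) * h(n-1) + h(n-2)
--     k(n) = a(n) * k(n-1) + k(n-2)
--     with h(0) = 2 and h(1) = 3
--     with k(0) = 1 and k(1) = 1
--     a(n) = alternating as follow 2,1,1,4,1,1,6,1,1,...
--     """
--     h = [2, 3]
--     k = [1, 1]
--     for n in range(2, m):
--         a = int((n + 1) / 3 * 2) if ((n + 1) % 3) == 0 else 1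
--         h[0], h[1] = h[1], a * h[1] + h[0]
--         k[0], k[1] = k[1], a * k[1] + k[0]
--     return h[1], k[1]
-- ===== SOURCE B (Python) =====
-- def convergent_of_e_fraction(m):
--     # Build the continued-fraction coefficients of e for L = max(m, 2) terms,
--     # then evaluate the convergent by folding the nested fraction back-to-front.
--     L = max(m, 2)
--     a = [2] + [2 * (n + 1) // 3 if (n + 1) % 3 == 0 else 1 for n in range(1, L)]
--     num, den = 1, 0
--     for c in reversed(a):
--         num, den = c * num + den, num
--     return num, den
-- ===== Notes on version B (the rewrite author's own statement) =====
-- stated objective: alternative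
-- what changed: Replaces A's forward two-term h/k recurrence updated in a single loop by first materialising the continued-fraction coefficient list of e for max(m,2) terms and then evaluating the nested fraction by a backward fold (num,den = c*num+den, num) over the reversed list.
import Mathlib
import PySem

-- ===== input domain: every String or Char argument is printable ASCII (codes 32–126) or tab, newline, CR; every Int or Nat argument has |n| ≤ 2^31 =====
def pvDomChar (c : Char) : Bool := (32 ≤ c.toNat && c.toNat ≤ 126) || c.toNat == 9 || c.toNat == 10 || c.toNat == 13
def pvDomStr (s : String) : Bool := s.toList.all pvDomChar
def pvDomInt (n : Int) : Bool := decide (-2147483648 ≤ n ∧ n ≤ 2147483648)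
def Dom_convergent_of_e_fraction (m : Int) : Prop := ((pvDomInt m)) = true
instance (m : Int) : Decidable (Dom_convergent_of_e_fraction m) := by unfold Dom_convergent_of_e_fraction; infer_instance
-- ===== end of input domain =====

-- B builds the coefficient list once and folds the nested fraction back-to-front,
-- instead of A's forward two-term h/k recurrence (alternative decomposition, same cost).

-- ===== PORT A =====
-- state is (h0, h1, k0, k1); the simultaneous tuple assignments become one state update.
-- int((n+1)/3*2) is ported as floor((2*(n+1))/3): on Dom (2 ≤ n < 2^31, 3 ∣ n+1) the
-- Python float arithmetic is exact and int-truncation equals this floor.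
def convergent_of_e_fraction (m : Int) : Int × Int :=
  let s := (PySem.List.pyRange 2 m 1).foldl
    (fun (st : Int × Int × Int × Int) n =>
      let a := if PySem.Int.mod (n + 1) 3 == 0 then PySem.Int.floordiv (2 * (n + 1)) 3 else 1
      (st.2.1, a * st.2.1 + st.1, st.2.2.2, a * st.2.2.2 + st.2.2.1))
    (2, 3, 1, 1)
  (s.2.1, s.2.2.2)

-- ===== PORT B =====
def convergent_of_e_fraction_alt (m : Int) : Int × Int :=
  let L := max m 2
  let a : List Int :=
    2 :: (PySem.List.pyRange 1 L 1).map
      (fun n => if PySem.Int.mod (n + 1) 3 == 0 then PySem.Int.floordiv (2 * (n + 1)) 3 else 1)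
  a.reverse.foldl (fun (p : Int × Int) c => (c * p.1 + p.2, p.1)) (1, 0)

-- ===== PRECONDITION & SPEC =====
def Spec_convergent_of_e_fraction (m : Int) (out : Int × Int) : Prop := out = convergent_of_e_fraction_alt m
instance (m : Int) (out : Int × Int) : Decidable (Spec_convergent_of_e_fraction m out) := by unfold Spec_convergent_of_e_fraction; infer_instance

-- ===== CLAIM (what is proved, stated in full; the proofs are below) =====
def Claim_equal_convergent_of_e_fraction : Prop := ∀ (m : Int), Dom_convergent_of_e_fraction m → Spec_convergent_of_e_fraction m (convergent_of_e_fraction m)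

-- ===== LEMMAS AND PROOFS =====

-- named forms of the two loop bodies and the shared coefficient (definitionally equal to the ports' inline code)
def pvStepA (st : Int × Int × Int × Int) (a : Int) : Int × Int × Int × Int :=
  (st.2.1, a * st.2.1 + st.1, st.2.2.2, a * st.2.2.2 + st.2.2.1)

def pvStepB (p : Int × Int) (c : Int) : Int × Int := (c * p.1 + p.2, p.1)

def pvCoeff (n : Int) : Int :=
  if PySem.Int.mod (n + 1) 3 == 0 then PySem.Int.floordiv (2 * (n + 1)) 3 else 1

-- 2×2 integer matrices as quadruples (a, b, c, d) = [[a, b], [c, d]].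
def pvMul (X Y : Int × Int × Int × Int) : Int × Int × Int × Int :=
  (X.1 * Y.1 + X.2.1 * Y.2.2.1, X.1 * Y.2.1 + X.2.1 * Y.2.2.2,
   X.2.2.1 * Y.1 + X.2.2.2 * Y.2.2.1, X.2.2.1 * Y.2.1 + X.2.2.2 * Y.2.2.2)

def pvM (c : Int) : Int × Int × Int × Int := (c, 1, 1, 0)

def pvProdR (l : List Int) : Int × Int × Int × Int :=
  l.foldr (fun c acc => pvMul (pvM c) acc) (1, 0, 0, 1)

lemma pvMul_assoc (X Y Z : Int × Int × Int × Int) :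
    pvMul (pvMul X Y) Z = pvMul X (pvMul Y Z) := by
  simp only [pvMul, Prod.mk.injEq]
  and_intros <;> ring

lemma pvMul_one (X : Int × Int × Int × Int) : pvMul X (1, 0, 0, 1) = X := by
  simp [pvMul]

-- the forward matrix product accumulated by a foldl equals pvMul of the seed with pvProdR
lemma foldl_pvMul (cs : List Int) :
    ∀ X : Int × Int × Int × Int,
      cs.foldl (fun Y c => pvMul Y (pvM c)) X = pvMul X (pvProdR cs) := by
  induction cs with
  | nil => intro X; simp [pvProdR, pvMul_one]
  | cons c cs ih =>
    intro X
    simp only [List.foldl_cons, ih, pvProdR, List.foldr_cons, ← pvMul_assoc]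

-- A's loop state, viewed as the matrix (h1, h0, k1, k0), multiplies by pvM of each coefficient
lemma foldl_stateA (cs : List Int) :
    ∀ st : Int × Int × Int × Int,
      (fun s : Int × Int × Int × Int => (s.2.1, s.1, s.2.2.2, s.2.2.1)) (cs.foldl pvStepA st)
        = cs.foldl (fun Y c => pvMul Y (pvM c)) ((st.2.1, st.1, st.2.2.2, st.2.2.1)) := by
  induction cs with
  | nil => intro st; rfl
  | cons c cs ih =>
    intro st
    simp only [List.foldl_cons, ih]
    congr 1
    simp only [pvStepA, pvMul, pvM, Prod.mk.injEq]
    and_intros <;> ring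

-- B's backward fold computes the first column of pvProdR
lemma foldr_colB (l : List Int) :
    l.foldr (fun c p => pvStepB p c) (1, 0)
      = ((pvProdR l).1, (pvProdR l).2.2.1) := by
  induction l with
  | nil => rfl
  | cons c l ih =>
    rw [List.foldr_cons, ih]
    simp only [pvStepB, pvProdR, List.foldr_cons, pvMul, pvM, Prod.mk.injEq]
    and_intros <;> ring

-- the two evaluations agree for ANY coefficient tail cs (prepended with the fixed a0 = 2, a1 = 1)
lemma pv_core (cs : List Int) :
    (((cs.foldl pvStepA (2, 3, 1, 1)).2.1, (cs.foldl pvStepA (2, 3, 1, 1)).2.2.2) : Int × Int)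
      = (2 :: 1 :: cs).reverse.foldl pvStepB (1, 0) := by
  have hA := foldl_stateA cs ((2, 3, 1, 1) : Int × Int × Int × Int)
  rw [foldl_pvMul] at hA
  have h21 : pvProdR (2 :: 1 :: cs)
      = pvMul ((3, 2, 1, 1) : Int × Int × Int × Int) (pvProdR cs) := by
    simp only [pvProdR, List.foldr_cons, ← pvMul_assoc]
    norm_num [pvMul, pvM]
  rw [List.foldl_reverse, foldr_colB, h21]
  have h1 := congrArg (fun X : Int × Int × Int × Int => X.1) hA
  have h3 := congrArg (fun X : Int × Int × Int × Int => X.2.2.1) hA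
  simp only at h1 h3
  rw [h1, h3]

-- ===== VERDICT (by name: the statement is the Claim_ definition above) =====
theorem convergent_of_e_fraction_spec : Claim_equal_convergent_of_e_fraction := by
  intro m _
  show convergent_of_e_fraction m = convergent_of_e_fraction_alt m
  -- restate both sides through the named loop bodies (definitionally equal to the ports)
  show (((PySem.List.pyRange 2 m 1).foldl (fun st n => pvStepA st (pvCoeff n))
            ((2, 3, 1, 1) : Int × Int × Int × Int)).2.1,
        ((PySem.List.pyRange 2 m 1).foldl (fun st n => pvStepA st (pvCoeff n))
            ((2, 3, 1, 1) : Int × Int × Int × Int)).2.2.2)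
      = (2 :: (PySem.List.pyRange 1 (max m 2) 1).map pvCoeff).reverse.foldl pvStepB (1, 0)
  by_cases hm : m ≤ 2
  · rw [PySem.List.pyRange_one_eq_nil hm, max_eq_right hm]
    decide
  · rw [max_eq_left (by omega : (2 : Int) ≤ m),
        PySem.List.pyRange_one_cons (show (1 : Int) < m by omega), List.map_cons,
        show pvCoeff 1 = 1 from by decide,
        show (PySem.List.pyRange 2 m 1).foldl (fun st n => pvStepA st (pvCoeff n)) (2, 3, 1, 1)
           = ((PySem.List.pyRange 2 m 1).map pvCoeff).foldl pvStepA (2, 3, 1, 1) from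
          by rw [List.foldl_map]]
    exact pv_core _
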